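-- pv_equiv track=rewrite | github.com/mhfatima12/SWENGAssignment2 | Calc.py | is_valid
-- ===== SOURCE A (Python) =====
-- OPERATORS = ('+', '-', '*', '/', '^', '(', ')', '.', 'l', 'o', 'g', 'e', 'x', 'p', 'L', 'O', 'G', 'E', 'X', 'P')
--
-- DIGITS = ('1', '2', '3', '4', '5', '6', '7', '8', '9', '0')
--
-- def is_valid(lst):
--     last_item = ''
--     for i in lst:
--         if i not in OPERATORS and i not in DIGITS:
--             return False
--         if lst.__len__() > lst.index(i) and i in OPERATORS and i != '-' and last_item == i:
--             return False
--         last_item = i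
--     return True
-- ===== SOURCE B (Python) =====
-- OPERATORS = ('+', '-', '*', '/', '^', '(', ')', '.', 'l', 'o', 'g', 'e', 'x', 'p', 'L', 'O', 'G', 'E', 'X', 'P')
--
-- DIGITS = ('1', '2', '3', '4', '5', '6', '7', '8', '9', '0')
--
-- def is_valid(lst):
--     for i in lst:
--         if i not in OPERATORS and i not in DIGITS:
--             return False
--     for a, b in zip(lst, lst[1:]):
--         if a == b and b in OPERATORS and b != '-':
--             return False
--     return True
-- ===== Notes on version B (the rewrite author's own statement) =====
-- stated objective: simpler
-- what changed: Replaces the accumulator-threaded single loop (with its redundant lst.index() scan per element) by two plain passes: a membership scan and a pairwise zip(lst, lst[1:]) adjacency check.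
import Mathlib
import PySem

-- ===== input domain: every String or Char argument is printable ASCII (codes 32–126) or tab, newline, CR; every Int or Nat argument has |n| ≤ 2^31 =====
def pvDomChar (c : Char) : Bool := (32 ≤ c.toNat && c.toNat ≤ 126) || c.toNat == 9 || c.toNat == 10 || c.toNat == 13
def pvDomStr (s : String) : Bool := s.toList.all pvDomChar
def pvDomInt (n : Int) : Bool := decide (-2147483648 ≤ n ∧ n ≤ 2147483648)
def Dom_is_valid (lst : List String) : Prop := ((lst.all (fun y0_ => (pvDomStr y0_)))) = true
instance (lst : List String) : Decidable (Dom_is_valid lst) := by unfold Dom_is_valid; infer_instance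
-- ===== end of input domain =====

-- B replaces A's accumulator-threaded single loop by two plain passes (membership scan, then pairwise adjacency check): simpler decomposition, same results.


def pvOPERATORS : List String :=
  ["+", "-", "*", "/", "^", "(", ")", ".", "l", "o", "g", "e", "x", "p", "L", "O", "G", "E", "X", "P"]

def pvDIGITS : List String := ["1", "2", "3", "4", "5", "6", "7", "8", "9", "0"]

-- ===== PORT A =====
-- the loop: carries last_item; 'lst' is kept whole for the lst.index(i) / lst.__len__() call
def pvAGo (lst : List String) : List String → String → Bool
  | [], _ => true
  | i :: rest, last_item =>
    if !(pvOPERATORS.contains i) && !(pvDIGITS.contains i) then false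
    else if (match PySem.List.index? lst i with
             | some k => decide (lst.length > k)
             | none => false)   -- none = ValueError; unreachable, i is always a member of lst
            && pvOPERATORS.contains i && i != "-" && last_item == i then false
    else pvAGo lst rest i

def is_valid (lst : List String) : Bool := pvAGo lst lst ""

-- ===== PORT B =====
-- first pass: every token is an operator or a digit
def pvAllValid : List String → Bool
  | [] => true
  | i :: rest =>
    if !(pvOPERATORS.contains i) && !(pvDIGITS.contains i) then false
    else pvAllValid rest

-- second pass: over consecutive pairs (zip(lst, lst[1:]))
def pvPairsOk : List String → Bool
  | a :: b :: rest =>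
    if a == b && pvOPERATORS.contains b && b != "-" then false
    else pvPairsOk (b :: rest)
  | _ => true

def is_valid_alt (lst : List String) : Bool := pvAllValid lst && pvPairsOk lst

-- ===== PRECONDITION & SPEC =====
def Spec_is_valid (lst : List String) (out : Bool) : Prop := out = is_valid_alt lst
instance (lst : List String) (out : Bool) : Decidable (Spec_is_valid lst out) := by unfold Spec_is_valid; infer_instance

-- ===== CLAIM (what is proved, stated in full; the proofs are below) =====
def Claim_equal_is_valid : Prop := ∀ (lst : List String), Dom_is_valid lst → Spec_is_valid lst (is_valid lst)

-- ===== LEMMAS AND PROOFS =====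

-- lst.index(i) never raises and is always < len(lst) when i ∈ lst
theorem pvIndexCond (lst : List String) (i : String) (h : i ∈ lst) :
    (match PySem.List.index? lst i with
     | some k => decide (lst.length > k)
     | none => false) = true := by
  have hs : (PySem.List.index? lst i).isSome := (PySem.List.index?_isSome_iff lst i).mpr h
  obtain ⟨k, hk⟩ := Option.isSome_iff_exists.mp hs
  obtain ⟨hlt, -, -⟩ := PySem.List.getElem_of_index?_eq_some hk
  simp only [PySem.List.index?_eq_idxOf?] at hk ⊢
  rw [hk]
  simp [hlt]

-- main loop invariant: A's loop equals B's two passes, with last_item prepended for the pair check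
theorem pvGo_eq (lst : List String) :
    ∀ rest last, (∀ i ∈ rest, i ∈ lst) →
      pvAGo lst rest last = (pvAllValid rest && pvPairsOk (last :: rest)) := by
  intro rest
  induction rest with
  | nil => intro last _; simp [pvAGo, pvAllValid, pvPairsOk]
  | cons i rest ih =>
    intro last hsub
    have hi : i ∈ lst := hsub i (List.mem_cons_self ..)
    have hrest : ∀ j ∈ rest, j ∈ lst := fun j hj => hsub j (List.mem_cons_of_mem _ hj)
    have hidx := pvIndexCond lst i hi
    rw [pvAGo, pvAllValid, hidx, ih i hrest]
    by_cases hOp : i ∈ pvOPERATORS <;> by_cases hDig : i ∈ pvDIGITS <;>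
      by_cases hDash : i = "-" <;> by_cases hLast : last = i <;>
        simp [pvPairsOk, hOp, hDig, hDash, hLast,
          Bool.and_assoc, Bool.and_comm, Bool.and_left_comm]

theorem pvPairsOk_empty_head (lst : List String) : pvPairsOk ("" :: lst) = pvPairsOk lst := by
  cases lst with
  | nil => rfl
  | cons b rest =>
    by_cases h : b = ""
    · subst h; simp [pvPairsOk, pvOPERATORS]
    · simp [pvPairsOk, h]

-- ===== VERDICT (by name: the statement is the Claim_ definition above) =====
theorem is_valid_spec : Claim_equal_is_valid := by
  intro lst _
  show is_valid lst = is_valid_alt lst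
  rw [is_valid, is_valid_alt, pvGo_eq lst lst "" (fun _ h => h), pvPairsOk_empty_head]
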